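-- pv_equiv track=rewrite | github.com/Rai220/anima | epoch_2/generation_1/minimal_break.py | gilbreath_violation_depth
-- ===== SOURCE A (Python) =====
-- def abs_diff_row(row):
--     return [abs(row[i+1] - row[i]) for i in range(len(row) - 1)]
--
-- def gilbreath_violation_depth(seq, max_depth=500):
--     row = seq[:]
--     for d in range(max_depth):
--         if len(row) < 2:
--             return None
--         row = abs_diff_row(row)
--         if row[0] != 1:
--             return d + 1
--     return None
-- ===== SOURCE B (Python) =====
-- def gilbreath_violation_depth(seq, max_depth=500):
--     # Stream the sequence left to right, maintaining the difference triangle's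
--     # frontier diagonal: edge[k] holds the most recent element of row k.  When
--     # element j arrives, propagating it down the diagonal produces the first element of row j
--     # immediately, so each depth is checked
--     # as soon as its row comes into existence, in a single pass over seq.
--     edge = []
--     for j, x in enumerate(seq):
--         if j > max_depth:
--             return None
--         v = x
--         for k in range(len(edge)):
--             v, edge[k] = abs(v - edge[k]), v
--         edge.append(v)
--         if j >= 1 and v != 1:
--             return j
--     return None
-- ===== Notes on version B (the rewrite author's own statement) =====
-- stated objective: faster
-- what changed: B replaces A's depth-by-depth recomputation of whole difference rows with a single left-to-right streaming pass that maintains the frontier diagonal of the difference triangle (edge[k] = latest element of row k); propagating each new element down the diagonal yields the first element of each new row the moment that row comes into existence, so only the O(min(n,max_depth+1)^2) leading triangle cells are computed instead of A's O(n*max_depth) full rows.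
import Mathlib
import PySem

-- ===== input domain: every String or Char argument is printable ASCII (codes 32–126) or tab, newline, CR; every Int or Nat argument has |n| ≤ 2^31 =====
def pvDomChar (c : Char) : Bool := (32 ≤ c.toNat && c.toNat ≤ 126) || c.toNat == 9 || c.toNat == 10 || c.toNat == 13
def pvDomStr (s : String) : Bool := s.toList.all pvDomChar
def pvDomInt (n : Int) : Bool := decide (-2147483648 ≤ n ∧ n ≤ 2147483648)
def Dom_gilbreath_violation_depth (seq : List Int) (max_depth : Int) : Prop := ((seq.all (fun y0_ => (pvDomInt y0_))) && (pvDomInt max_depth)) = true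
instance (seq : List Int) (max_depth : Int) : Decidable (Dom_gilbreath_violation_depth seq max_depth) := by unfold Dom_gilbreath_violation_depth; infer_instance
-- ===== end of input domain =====

-- B streams seq left to right maintaining the difference triangle's frontier diagonal
-- instead of recomputing whole rows per depth (alternative decomposition); return values proved equal.


-- ===== PORT A =====
-- abs_diff_row: [abs(row[i+1] - row[i]) for i in range(len(row) - 1)]
def absDiffRow (row : List Int) : List Int :=
  (PySem.List.pyRange 0 ((row.length : Int) - 1) 1).map
    (fun i => |((PySem.List.pyGet? row (i + 1)).getD 0) - ((PySem.List.pyGet? row i).getD 0)|)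
-- (the indices i and i+1 are always in range, so .getD 0 never supplies its default)

-- the 'for d in range(max_depth)' loop; fuel = remaining iterations, d the Python loop index
def aLoop : List Int → Int → Nat → Option Int
  | _, _, 0 => none
  | row, d, fuel + 1 =>
    if row.length < 2 then none
    else
      let row' := absDiffRow row
      if (PySem.List.pyGet? row' 0).getD 0 ≠ 1 then some (d + 1)
      else aLoop row' (d + 1) fuel

def gilbreath_violation_depth (seq : List Int) (max_depth : Int) : Option Int :=
  aLoop (PySem.List.slice seq none none) 0 max_depth.toNat

-- ===== PORT B =====
-- inner loop 'for k in range(len(edge)): v, edge[k] = abs(v - edge[k]), v' followed by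
-- 'edge.append(v)': returns (the new edge list, the final v)
def pushElem : List Int → Int → List Int × Int
  | [], v => ([v], v)
  | e :: rest, v =>
      let r := pushElem rest (|v - e|)
      (v :: r.1, r.2)

-- the 'for j, x in enumerate(seq)' loop of Source B
def bLoop : List Int → Int → Int → List Int → Option Int
  | _, _, _, [] => none
  | edge, j, md, x :: rest =>
    if md < j then none
    else if 1 ≤ j ∧ (pushElem edge x).2 ≠ 1 then some j
    else bLoop (pushElem edge x).1 (j + 1) md rest

def gilbreath_violation_depth_alt (seq : List Int) (max_depth : Int) : Option Int :=
  bLoop [] 0 max_depth seq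

-- ===== PRECONDITION & SPEC =====
def Spec_gilbreath_violation_depth (seq : List Int) (max_depth : Int) (out : Option Int) : Prop := out = gilbreath_violation_depth_alt seq max_depth
instance (seq : List Int) (max_depth : Int) (out : Option Int) : Decidable (Spec_gilbreath_violation_depth seq max_depth out) := by unfold Spec_gilbreath_violation_depth; infer_instance

-- ===== CLAIM (what is proved, stated in full; the proofs are below) =====
def Claim_equal_gilbreath_violation_depth : Prop := ∀ (seq : List Int) (max_depth : Int), Dom_gilbreath_violation_depth seq max_depth → Spec_gilbreath_violation_depth seq max_depth (gilbreath_violation_depth seq max_depth)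

-- ===== LEMMAS AND PROOFS =====

-- one difference row, as a zipWith
def dstep (l : List Int) : List Int := List.zipWith (fun a b => |b - a|) l l.tail

-- iterated difference rows
def dIter : Nat → List Int → List Int
  | 0, l => l
  | k + 1, l => dIter k (dstep l)

theorem dstep_length (l : List Int) : (dstep l).length = l.length - 1 := by
  simp [dstep]

theorem dIter_length (k : Nat) : ∀ l : List Int, (dIter k l).length = l.length - k := by
  induction k with
  | zero => intro l; simp [dIter]
  | succ k ih => intro l; rw [dIter, ih, dstep_length]; omega

theorem dIter_succ' (k : Nat) : ∀ l : List Int, dIter (k + 1) l = dstep (dIter k l) := by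
  induction k with
  | zero => intro l; rfl
  | succ k ih => intro l; rw [dIter, ih, dIter]

-- A's indexed comprehension computes exactly one dstep
theorem absDiffRow_eq_dstep (row : List Int) : absDiffRow row = dstep row := by
  unfold absDiffRow dstep
  apply List.ext_getElem
  · simp [PySem.List.length_pyRange_one, List.length_zipWith, List.length_tail]
  · intro i h1 h2
    simp only [List.getElem_map, PySem.List.getElem_pyRange_one, List.getElem_zipWith, List.getElem_tail]
    have hi : i + 1 < row.length := by
      simp [PySem.List.length_pyRange_one] at h1; omega
    have e1 : (0 : Int) + (i : Int) + 1 = ((i + 1 : Nat) : Int) := by push_cast; ring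
    have e2 : (0 : Int) + (i : Int) = ((i : Nat) : Int) := by norm_num
    rw [e1, e2, PySem.List.pyGet?_natCast, PySem.List.pyGet?_natCast]
    simp [hi, Nat.lt_of_succ_lt hi]

theorem pyGet?_zero_getD (xs : List Int) : (PySem.List.pyGet? xs 0).getD 0 = xs.headD 0 := by
  have : (0 : Int) = ((0 : Nat) : Int) := rfl
  rw [this, PySem.List.pyGet?_natCast]
  cases xs <;> simp

-- search for the first violating depth, indexed as A's loop is (step d checks depth d+1)
def fv (seq : List Int) : Nat → Nat → Option Int
  | _, 0 => none
  | d, fuel + 1 =>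
    if seq.length < d + 2 then none
    else if (dIter (d + 1) seq).headD 0 ≠ 1 then some ((d : Int) + 1)
    else fv seq (d + 1) fuel

theorem aLoop_eq_fv (seq : List Int) (fuel : Nat) : ∀ d : Nat,
    aLoop (dIter d seq) (d : Int) fuel = fv seq d fuel := by
  induction fuel with
  | zero => intro d; rfl
  | succ fuel ih =>
    intro d
    rw [aLoop, fv]
    have hl : (dIter d seq).length = seq.length - d := dIter_length d seq
    by_cases h : seq.length < d + 2
    · rw [if_pos (by omega), if_pos h]
    · rw [if_neg (by omega), if_neg h]
      dsimp only
      rw [absDiffRow_eq_dstep, pyGet?_zero_getD, ← dIter_succ']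
      by_cases hv : (dIter (d + 1) seq).headD 0 ≠ 1
      · rw [if_pos hv, if_pos hv]
      · rw [if_neg hv, if_neg hv]
        have := ih (d + 1)
        rw [← this]
        norm_num

-- diffing a prefix is taking a prefix of the diff
theorem dstep_take (k : Nat) (xs : List Int) :
    dstep (xs.take k) = (dstep xs).take (k - 1) := by
  induction xs generalizing k with
  | nil => simp [dstep]
  | cons x xs ih =>
    cases k with
    | zero => simp [dstep]
    | succ k =>
      cases xs with
      | nil => simp [dstep]
      | cons y ys =>
        cases k with
        | zero => simp [dstep]
        | succ k =>
          simp only [List.take_succ_cons, dstep, List.tail_cons, List.zipWith_cons_cons,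
            Nat.succ_sub_one]
          congr 1
          simpa [dstep] using ih (k + 1)

theorem dIter_take (j : Nat) : ∀ (k : Nat) (l : List Int),
    dIter j (l.take (j + k)) = (dIter j l).take k := by
  induction j with
  | zero => intro k l; simp [dIter]
  | succ j ih =>
    intro k l
    rw [dIter, dstep_take, dIter]
    have e : j + 1 + k - 1 = j + k := by omega
    rw [e, ih]

theorem headD_take_one (xs : List Int) : (xs.take 1).headD 0 = xs.headD 0 := by
  cases xs <;> simp

-- frontier diagonal of the difference triangle of a prefix
def edgeOf : List Int → List Int
  | [] => []
  | x :: xs => (x :: xs).getLastD 0 :: edgeOf (dstep (x :: xs))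
  termination_by l => l.length
  decreasing_by simp [dstep]

theorem dstep_snoc : ∀ (p : List Int) (x : Int), p ≠ [] →
    dstep (p ++ [x]) = dstep p ++ [|x - p.getLastD 0|] := by
  intro p
  induction p with
  | nil => intro x h; exact absurd rfl h
  | cons a t ih =>
    intro x _
    cases t with
    | nil => simp [dstep]
    | cons b u =>
      have h := ih x (by simp)
      simp only [List.cons_append] at h ⊢
      rw [show dstep (a :: b :: (u ++ [x])) = |b - a| :: dstep (b :: (u ++ [x])) from rfl,
          show dstep (a :: b :: u) = |b - a| :: dstep (b :: u) from rfl,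
          show (a :: b :: u).getLastD 0 = (b :: u).getLastD 0 from rfl, h]
      simp

-- the apex value of the triangle over q (first element of the deepest row)
def apexV (q : List Int) : Int := (dIter (q.length - 1) q).headD 0

theorem pushElem_edgeOf : ∀ (n : Nat) (p : List Int), p.length = n → ∀ x : Int,
    pushElem (edgeOf p) x = (edgeOf (p ++ [x]), apexV (p ++ [x])) := by
  intro n
  induction n using Nat.strong_induction_on with
  | _ n ih =>
    intro p hn x
    cases p with
    | nil => simp [edgeOf, pushElem, apexV, dIter, dstep]
    | cons a t =>
      rw [edgeOf, pushElem]
      have hlen : (dstep (a :: t)).length = t.length := by simp [dstep]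
      have hn' : n = t.length + 1 := by simpa using hn.symm
      have hrec := ih t.length (by omega) (dstep (a :: t)) hlen (|x - (a :: t).getLastD 0|)
      rw [hrec]
      have hsnoc : dstep (a :: t) ++ [|x - (a :: t).getLastD 0|] = dstep (a :: (t ++ [x])) := by
        have := (dstep_snoc (a :: t) x (by simp)).symm
        simpa using this
      rw [hsnoc]
      have he : edgeOf (a :: (t ++ [x])) = x :: edgeOf (dstep (a :: (t ++ [x]))) := by
        rw [edgeOf]
        congr 1
        rw [show a :: (t ++ [x]) = (a :: t) ++ [x] by simp, List.getLastD_concat]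
      have ha : apexV (a :: (t ++ [x])) = apexV (dstep (a :: (t ++ [x]))) := by
        unfold apexV
        have hl : (dstep (a :: (t ++ [x]))).length - 1 = t.length := by simp [dstep]
        have hl2 : (a :: (t ++ [x])).length - 1 = t.length + 1 := by simp
        rw [hl, hl2, dIter]
      dsimp only
      simp only [List.cons_append]
      rw [he, ha]

theorem pushElem_edgeOf' (p : List Int) (x : Int) :
    pushElem (edgeOf p) x = (edgeOf (p ++ [x]), apexV (p ++ [x])) :=
  pushElem_edgeOf p.length p rfl x

-- B's streaming loop performs the same first-violation search as A's row iteration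
theorem bLoop_eq_fv : ∀ (rest p : List Int) (md : Int), 1 ≤ p.length →
    bLoop (edgeOf p) (p.length : Int) md rest
      = fv (p ++ rest) (p.length - 1) (md.toNat - (p.length - 1)) := by
  intro rest
  induction rest with
  | nil =>
    intro p md hp
    cases h : md.toNat - (p.length - 1) with
    | zero => rw [bLoop, fv]
    | succ m =>
      rw [bLoop, fv, if_pos (show (p ++ ([] : List Int)).length < p.length - 1 + 2 by
        simp; omega)]
  | cons x rest ih =>
    intro p md hp
    by_cases hmd : md < (p.length : Int)
    · have h0 : md.toNat - (p.length - 1) = 0 := by omega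
      rw [bLoop, if_pos hmd, h0, fv]
    · have h1 : md.toNat - (p.length - 1) = (md.toNat - p.length) + 1 := by omega
      rw [bLoop, if_neg hmd, h1, fv,
        if_neg (show ¬ (p ++ x :: rest).length < p.length - 1 + 2 by simp; omega),
        pushElem_edgeOf']
      dsimp only
      have htake : (p ++ x :: rest).take (p.length + 1) = p ++ [x] := by
        simpa using List.take_length_add_append (l₁ := p) (l₂ := x :: rest) 1
      have hap : apexV (p ++ [x]) = (dIter (p.length - 1 + 1) (p ++ x :: rest)).headD 0 := by
        unfold apexV
        rw [show (p ++ [x]).length - 1 = p.length by simp,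
          show p.length - 1 + 1 = p.length from by omega, ← htake,
          dIter_take p.length 1, headD_take_one]
      by_cases hv : (dIter (p.length - 1 + 1) (p ++ x :: rest)).headD 0 ≠ 1
      · rw [if_pos ⟨by exact_mod_cast hp, by rw [hap]; exact hv⟩, if_pos hv]
        congr 1
        omega
      · rw [if_neg (fun hc => hv (hap ▸ hc.2)), if_neg hv]
        have hb := ih (p ++ [x]) md (by simp)
        simp only [List.length_append, List.length_cons, List.length_nil] at hb
        push_cast at hb ⊢
        rw [List.append_assoc] at hb
        simp only [List.cons_append, List.nil_append] at hb
        rw [hb]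
        congr 1
        omega

-- ===== VERDICT (by name: the statement is the Claim_ definition above) =====
theorem gilbreath_violation_depth_spec : Claim_equal_gilbreath_violation_depth := by
  intro seq max_depth _
  unfold Spec_gilbreath_violation_depth gilbreath_violation_depth gilbreath_violation_depth_alt
  rw [PySem.List.slice_none_none]
  have hA : aLoop seq 0 max_depth.toNat = fv seq 0 max_depth.toNat := by
    have := aLoop_eq_fv seq max_depth.toNat 0
    simpa [dIter] using this
  rw [hA]
  cases seq with
  | nil =>
    cases h : max_depth.toNat with
    | zero => rw [fv, bLoop]
    | succ m => rw [fv, if_pos (by simp), bLoop]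
  | cons x rest =>
    rw [bLoop]
    by_cases hmd : max_depth < 0
    · rw [if_pos (by exact_mod_cast hmd)]
      have h0 : max_depth.toNat = 0 := by omega
      rw [h0, fv]
    · rw [if_neg (by exact_mod_cast hmd), if_neg (by simp)]
      have hedge : edgeOf [x] = [x] := by simp [edgeOf, dstep]
      have hb := bLoop_eq_fv rest [x] max_depth (by simp)
      simp only [List.length_cons, List.length_nil] at hb
      rw [hedge] at hb
      norm_num at hb
      rw [show (pushElem [] x).1 = [x] from rfl, zero_add, hb]
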